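-- pv_equiv track=rewrite | github.com/ARUNKUMARGV12/A-Visual-Centric-AI-Platform-for-Interactive-and-Adaptive-Learning | Visual-centric-AI-platform-for-effective-Learning-main/backend/src/agents/algorithm_explanation_agent.py | _count_nested_loops
-- ===== SOURCE A (Python) =====
-- def _count_nested_loops(code: str) -> int:
--     """Count the maximum nesting level of loops"""
--     lines = code.split('\n')
--     max_nesting = 0
--     current_nesting = 0
--     indent_stack = []
--
--     for line in lines:
--         stripped = line.strip()
--         if not stripped:
--             continue
--
--         indent = len(line) - len(line.lstrip())
--
--         # Handle indentation changes
--         while indent_stack and indent <= indent_stack[-1][1]: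
--             popped = indent_stack.pop()
--             if popped[0] in ['for', 'while']:
--                 current_nesting -= 1
--
--         # Check for loop keywords
--         if stripped.startswith(('for ', 'while ')):
--             current_nesting += 1
--             max_nesting = max(max_nesting, current_nesting)
--             indent_stack.append(('for' if stripped.startswith('for ') else 'while', indent))
--         elif any(stripped.startswith(keyword) for keyword in ['if ', 'def ', 'class ', 'try:', 'except:']):
--             indent_stack.append(('other', indent))
--
--     return max_nesting
-- ===== SOURCE B (Python) =====
-- def _count_nested_loops(code: str) -> int:
--     """Count the maximum nesting level of loops (ancestor-chain counting, no stack)."""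
--     recs = [(len(l) - len(l.lstrip()), l.strip().startswith(('for ', 'while ')))
--             for l in code.split('\n') if l.strip()]
--     best, seen = 0, []
--     for ind, lp in recs:
--         if lp:
--             # depth = 1 + number of loop lines on the backwards decreasing-minima
--             # chain of previously seen lines (nearest enclosing ancestors)
--             d, m = 1, ind
--             for jind, jlp in seen:
--                 if jind < m:
--                     m = jind
--                     if jlp:
--                         d += 1
--             best = max(best, d)
--         seen = [(ind, lp)] + seen
--     return best
-- ===== Notes on version B (the rewrite author's own statement) =====
-- stated objective: alternative
-- what changed: Replaces A's single-pass tagged indent-stack machine (with counter updates and explicit handling of if/def/class/try/except keywords) by a stackless two-phase algorithm: first map non-blank lines to (indent, is_loop) records, then for each loop line compute its depth directly as 1 + the number of loop lines on the backwards strictly-decreasing-indent-minima chain of the preceding lines.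
import Mathlib
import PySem

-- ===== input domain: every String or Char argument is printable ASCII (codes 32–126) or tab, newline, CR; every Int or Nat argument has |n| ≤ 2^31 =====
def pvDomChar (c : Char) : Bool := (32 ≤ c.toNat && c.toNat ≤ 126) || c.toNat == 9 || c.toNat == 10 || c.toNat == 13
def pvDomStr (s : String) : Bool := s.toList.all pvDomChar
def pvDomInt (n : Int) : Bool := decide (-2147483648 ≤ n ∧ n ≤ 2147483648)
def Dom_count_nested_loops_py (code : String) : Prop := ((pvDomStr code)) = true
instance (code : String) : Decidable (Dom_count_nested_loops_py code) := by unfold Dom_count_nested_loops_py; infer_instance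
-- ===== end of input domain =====

-- B replaces A's tagged indent-stack machine by a stackless per-loop-line ancestor-chain count
-- (alternative decomposition; not faster).

-- ===== PORT A =====
-- the inner `while indent_stack and indent <= indent_stack[-1][1]` pop loop (list head = top of stack)
def pvPop (ind : Int) : List (String × Int) → Int → (List (String × Int) × Int)
  | [], cur => ([], cur)
  | (k, i) :: rest, cur =>
    if ind ≤ i then pvPop ind rest (if ["for", "while"].contains k then cur - 1 else cur)
    else ((k, i) :: rest, cur)

-- the body of A's `for line in lines` loop; state = (max_nesting, current_nesting, indent_stack)
def pvAStep (st : Int × Int × List (String × Int)) (line : String) : Int × Int × List (String × Int) :=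
  let stripped := PySem.Str.strip line
  if stripped = "" then st
  else
    let indent : Int := (PySem.Str.len line : Int) - (PySem.Str.len (PySem.Str.lstrip line) : Int)
    let p := pvPop indent st.2.2 st.2.1
    if PySem.Str.startswith stripped "for " || PySem.Str.startswith stripped "while " then
      (max st.1 (p.2 + 1), p.2 + 1,
        ((if PySem.Str.startswith stripped "for " then "for" else "while"), indent) :: p.1)
    else if (["if ", "def ", "class ", "try:", "except:"].any
              (fun k => PySem.Str.startswith stripped k)) then
      (st.1, p.2, ("other", indent) :: p.1)
    else (st.1, p.2, p.1)

def count_nested_loops_py (code : String) : Int :=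
  (((PySem.Str.split? code "\n").getD []).foldl pvAStep (0, 0, [])).1

-- ===== PORT B =====
-- `recs = [(len(l)-len(l.lstrip()), l.strip().startswith(('for ','while '))) for l in code.split('\n') if l.strip()]`
def pvRec (l : String) : Option (Int × Bool) :=
  let s := PySem.Str.strip l
  if s = "" then none
  else some ((PySem.Str.len l : Int) - (PySem.Str.len (PySem.Str.lstrip l) : Int),
             PySem.Str.startswith s "for " || PySem.Str.startswith s "while ")

-- the inner `for jind, jlp in seen` scan; state = (d, m)
def pvScan (seen : List (Int × Bool)) (dm : Int × Int) : Int × Int :=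
  seen.foldl (fun dm r =>
    if r.1 < dm.2 then ((if r.2 then dm.1 + 1 else dm.1), r.1) else dm) dm

-- the body of B's `for ind, lp in recs` loop; state = (best, seen)
def pvBStep (st : Int × List (Int × Bool)) (r : Int × Bool) : Int × List (Int × Bool) :=
  (if r.2 then max st.1 (pvScan st.2 (1, r.1)).1 else st.1, r :: st.2)

def count_nested_loops_py_alt (code : String) : Int :=
  ((((PySem.Str.split? code "\n").getD []).filterMap pvRec).foldl pvBStep (0, [])).1

-- ===== PRECONDITION & SPEC =====
def Spec_count_nested_loops_py (code : String) (out : Int) : Prop := out = count_nested_loops_py_alt code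
instance (code : String) (out : Int) : Decidable (Spec_count_nested_loops_py code out) := by unfold Spec_count_nested_loops_py; infer_instance

-- ===== CLAIM (what is proved, stated in full; the proofs are below) =====
def Claim_equal_count_nested_loops_py : Prop := ∀ (code : String), Dom_count_nested_loops_py code → Spec_count_nested_loops_py code (count_nested_loops_py code)

-- ===== LEMMAS AND PROOFS =====

-- number of loop entries in (part of) A's stack
def pvLoopCnt (s : List (String × Int)) : Int :=
  ((s.filter (fun e => ["for", "while"].contains e.1)).length : Int)

-- loop entries of A's stack with indent strictly below threshold m
def pvBelow (s : List (String × Int)) (m : Int) : Int :=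
  pvLoopCnt (s.filter (fun e => decide (e.2 < m)))

-- what B's inner scan adds: loop count of the decreasing-minima chain of `seen` under threshold m
def pvC : List (Int × Bool) → Int → Int
  | [], _ => 0
  | (i, l) :: s, m => if i < m then (if l then 1 else 0) + pvC s i else pvC s m

theorem pvScan_fst (seen : List (Int × Bool)) (d m : Int) :
    (pvScan seen (d, m)).1 = d + pvC seen m := by
  induction seen generalizing d m with
  | nil => simp [pvScan, pvC]
  | cons r s ih =>
    obtain ⟨i, l⟩ := r
    simp only [pvScan, List.foldl_cons] at *
    by_cases h : i < m
    · cases l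
      · simp [pvC, h, ih]
      · simp [pvC, h, ih]
        ring
    · simp [pvC, h, ih]

theorem pvPop_spec (ind : Int) (s : List (String × Int))
    (hs : List.Pairwise (fun a b => b.2 < a.2) s) (c : Int) :
    pvPop ind s c = (s.filter (fun e => decide (e.2 < ind)),
                     c - pvLoopCnt s + pvLoopCnt (s.filter (fun e => decide (e.2 < ind)))) := by
  induction s generalizing c with
  | nil => simp [pvPop, pvLoopCnt]
  | cons e s ih =>
    obtain ⟨k, i⟩ := e
    rw [List.pairwise_cons] at hs
    by_cases h : ind ≤ i
    · have hni : ¬ (i < ind) := by omega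
      simp only [pvPop, if_pos h, ih hs.2]
      by_cases hk : (["for", "while"].contains k) = true
      · have h1 : pvLoopCnt ((k, i) :: s) = pvLoopCnt s + 1 := by
          simp only [pvLoopCnt, List.filter_cons, hk]
          simp
        rw [if_pos (by simpa using hk)]
        simp only [List.filter_cons, hni, decide_false, Bool.false_eq_true, if_false, h1]
        refine Prod.ext ?_ ?_
        · rfl
        · simp; ring
      · have h1 : pvLoopCnt ((k, i) :: s) = pvLoopCnt s := by
          simp only [pvLoopCnt, List.filter_cons, show (["for", "while"].contains k) = false
            from by simpa using hk]
          simp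
        rw [if_neg (by simpa using hk)]
        simp only [List.filter_cons, hni, decide_false, Bool.false_eq_true, if_false, h1]
    · have hi : i < ind := by omega
      have hall : s.filter (fun e => decide (e.2 < ind)) = s := by
        apply List.filter_eq_self.2
        intro a ha
        have := hs.1 a ha
        simp; omega
      simp [pvPop, h, hi, hall]

theorem pvBelow_filter (s : List (String × Int)) (ind m : Int) :
    pvBelow (s.filter (fun e => decide (e.2 < ind))) m = pvBelow s (min ind m) := by
  unfold pvBelow
  rw [List.filter_filter]
  congr 1
  apply List.filter_congr
  intro a _
  have : (a.2 < m ∧ a.2 < ind) ↔ a.2 < min ind m := by omega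
  simp [← this, Bool.and_comm]

theorem pvBelow_cons (tag : String) (ind m : Int) (s : List (String × Int)) :
    pvBelow ((tag, ind) :: s) m
      = (if ind < m ∧ (["for", "while"].contains tag) = true then 1 else 0) + pvBelow s m := by
  unfold pvBelow pvLoopCnt
  by_cases hm : ind < m
  · by_cases ht : (["for", "while"].contains tag) = true
    · simp [hm, show tag = "for" ∨ tag = "while" from by simpa using ht]
      ring
    · simp [hm, show ¬(tag = "for" ∨ tag = "while") from by simpa using ht]
  · simp [hm]

-- the invariant-carrying induction: A's fold (with cur = loop count of the stack) agrees with
-- B's fold whenever the chain counts of `seen` match the below-threshold loop counts of the stack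
theorem pvMain (lines : List String) (maxN : Int) (stack : List (String × Int))
    (seen : List (Int × Bool))
    (hSD : List.Pairwise (fun a b => b.2 < a.2) stack)
    (hC : ∀ m, pvC seen m = pvBelow stack m) :
    (lines.foldl pvAStep (maxN, pvLoopCnt stack, stack)).1
      = ((lines.filterMap pvRec).foldl pvBStep (maxN, seen)).1 := by
  induction lines generalizing maxN stack seen with
  | nil => simp
  | cons line rest ih =>
    by_cases hb : PySem.Str.strip line = ""
    · have hA0 : pvAStep (maxN, pvLoopCnt stack, stack) line = (maxN, pvLoopCnt stack, stack) := by
        simp [pvAStep, hb]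
      have hr0 : pvRec line = none := by simp [pvRec, hb]
      rw [List.foldl_cons, hA0, List.filterMap_cons, hr0]
      exact ih maxN stack seen hSD hC
    · have hrec : pvRec line
          = some ((PySem.Str.len line : Int) - (PySem.Str.len (PySem.Str.lstrip line) : Int),
                  PySem.Str.startswith (PySem.Str.strip line) "for "
                    || PySem.Str.startswith (PySem.Str.strip line) "while ") := by
        simp [pvRec, hb]
      generalize hind : (PySem.Str.len line : Int) - (PySem.Str.len (PySem.Str.lstrip line) : Int) = ind at hrec
      generalize hlp : (PySem.Str.startswith (PySem.Str.strip line) "for "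
                    || PySem.Str.startswith (PySem.Str.strip line) "while ") = lp at hrec
      rw [List.foldl_cons, List.filterMap_cons, hrec, List.foldl_cons]
      have hpop := pvPop_spec ind stack hSD (pvLoopCnt stack)
      have hSD₁ : List.Pairwise (fun (a b : String × Int) => b.2 < a.2)
          (stack.filter (fun e => decide (e.2 < ind))) := List.Pairwise.filter _ hSD
      have hmem₁ : ∀ e ∈ stack.filter (fun e => decide (e.2 < ind)), e.2 < ind := by
        intro e he
        have := List.of_mem_filter he
        simpa using this
      have hC₁ : ∀ m, pvC ((ind, lp) :: seen) m
          = (if ind < m ∧ lp = true then 1 else 0)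
              + pvBelow (stack.filter (fun e => decide (e.2 < ind))) m := by
        intro m
        rw [pvBelow_filter]
        by_cases hm : ind < m
        · rw [show min ind m = ind from by omega]
          cases lp <;> simp [pvC, hm, hC ind]
        · rw [show min ind m = m from by omega]
          simp [pvC, hm, hC m]
      have hscan : (pvScan seen (1, ind)).1
          = 1 + pvBelow (stack.filter (fun e => decide (e.2 < ind))) ind := by
        rw [pvScan_fst, hC ind, pvBelow_filter, show min ind ind = ind from by omega]
      by_cases hl : lp = true
      · -- loop line: A pushes ("for"/"while", ind) and bumps cur; B records a loop line
        have hA : pvAStep (maxN, pvLoopCnt stack, stack) line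
            = (max maxN (pvLoopCnt (stack.filter (fun e => decide (e.2 < ind))) + 1),
               pvLoopCnt (stack.filter (fun e => decide (e.2 < ind))) + 1,
               ((if PySem.Str.startswith (PySem.Str.strip line) "for " then "for" else "while"), ind)
                 :: stack.filter (fun e => decide (e.2 < ind))) := by
          simp only [pvAStep, if_neg hb, hind, hlp, hl, if_true, hpop]
          refine Prod.ext ?_ (Prod.ext ?_ ?_) <;> simp
        have hB : pvBStep (maxN, seen) (ind, lp)
            = (max maxN (1 + pvBelow (stack.filter (fun e => decide (e.2 < ind))) ind),
               (ind, lp) :: seen) := by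
          simp [pvBStep, hl, hscan]
        rw [hA, hB]
        have htagloop : (["for", "while"].contains
            (if PySem.Str.startswith (PySem.Str.strip line) "for " then "for" else "while")) = true := by
          split <;> simp
        have hSD₂ : List.Pairwise (fun (a b : String × Int) => b.2 < a.2)
            (((if PySem.Str.startswith (PySem.Str.strip line) "for " then "for" else "while"), ind)
              :: stack.filter (fun e => decide (e.2 < ind))) :=
          List.pairwise_cons.2 ⟨fun e he => hmem₁ e he, hSD₁⟩
        have hcnt₂ : pvLoopCnt
            (((if PySem.Str.startswith (PySem.Str.strip line) "for " then "for" else "while"), ind)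
              :: stack.filter (fun e => decide (e.2 < ind)))
            = pvLoopCnt (stack.filter (fun e => decide (e.2 < ind))) + 1 := by
          simp only [pvLoopCnt, List.filter_cons, htagloop]
          simp
        have hC₂ : ∀ m, pvC ((ind, lp) :: seen) m
            = pvBelow (((if PySem.Str.startswith (PySem.Str.strip line) "for " then "for" else "while"), ind)
                :: stack.filter (fun e => decide (e.2 < ind))) m := by
          intro m
          rw [hC₁ m, pvBelow_cons, htagloop, hl]
        have hbel : pvLoopCnt (stack.filter (fun e => decide (e.2 < ind)))
            = pvBelow (stack.filter (fun e => decide (e.2 < ind))) ind := by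
          rw [pvBelow_filter, show min ind ind = ind from by omega]
          rfl
        have hmain := ih (max maxN (pvLoopCnt (stack.filter (fun e => decide (e.2 < ind))) + 1))
          _ ((ind, lp) :: seen) hSD₂ hC₂
        rw [hcnt₂] at hmain
        rw [show (1 + pvBelow (stack.filter (fun e => decide (e.2 < ind))) ind)
              = pvLoopCnt (stack.filter (fun e => decide (e.2 < ind))) + 1 from by rw [hbel]; ring]
        exact hmain
      · -- non-loop line: cur stays; stack gets ("other", ind) pushed or nothing; B records (ind, false)
        have hl' : lp = false := by simpa using hl
        have hB : pvBStep (maxN, seen) (ind, lp) = (maxN, (ind, lp) :: seen) := by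
          simp [pvBStep, hl']
        rw [hB]
        have hCplain : ∀ m, pvC ((ind, lp) :: seen) m
            = pvBelow (stack.filter (fun e => decide (e.2 < ind))) m := by
          intro m
          rw [hC₁ m, hl']
          simp
        by_cases hkw : (["if ", "def ", "class ", "try:", "except:"].any
            (fun k => PySem.Str.startswith (PySem.Str.strip line) k)) = true
        · have hA : pvAStep (maxN, pvLoopCnt stack, stack) line
              = (maxN, pvLoopCnt (stack.filter (fun e => decide (e.2 < ind))),
                 ("other", ind) :: stack.filter (fun e => decide (e.2 < ind))) := by
            simp only [pvAStep, if_neg hb, hind, hlp, hl', Bool.false_eq_true, if_false, hkw,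
              if_true, hpop]
            refine Prod.ext ?_ (Prod.ext ?_ ?_) <;> simp
          rw [hA]
          have hSD₂ : List.Pairwise (fun (a b : String × Int) => b.2 < a.2)
              (("other", ind) :: stack.filter (fun e => decide (e.2 < ind))) :=
            List.pairwise_cons.2 ⟨fun e he => hmem₁ e he, hSD₁⟩
          have hcnt₂ : pvLoopCnt (("other", ind) :: stack.filter (fun e => decide (e.2 < ind)))
              = pvLoopCnt (stack.filter (fun e => decide (e.2 < ind))) := by
            simp [pvLoopCnt]
          have hC₂ : ∀ m, pvC ((ind, lp) :: seen) m
              = pvBelow (("other", ind) :: stack.filter (fun e => decide (e.2 < ind))) m := by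
            intro m
            rw [hCplain m, pvBelow_cons]
            simp
          have hmain := ih maxN _ ((ind, lp) :: seen) hSD₂ hC₂
          rw [hcnt₂] at hmain
          exact hmain
        · have hA : pvAStep (maxN, pvLoopCnt stack, stack) line
              = (maxN, pvLoopCnt (stack.filter (fun e => decide (e.2 < ind))),
                 stack.filter (fun e => decide (e.2 < ind))) := by
            simp only [pvAStep, if_neg hb, hind, hlp, hl', Bool.false_eq_true, if_false,
              hkw, hpop]
            refine Prod.ext ?_ (Prod.ext ?_ ?_) <;> simp
          rw [hA]
          exact ih maxN _ ((ind, lp) :: seen) hSD₁ hCplain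

-- ===== VERDICT (by name: the statement is the Claim_ definition above) =====
theorem count_nested_loops_py_spec : Claim_equal_count_nested_loops_py := by
  intro code _
  unfold Spec_count_nested_loops_py count_nested_loops_py count_nested_loops_py_alt
  have h0 : (0 : Int) = pvLoopCnt [] := by simp [pvLoopCnt]
  rw [show ((0 : Int), (0 : Int), ([] : List (String × Int)))
        = ((0 : Int), pvLoopCnt [], ([] : List (String × Int))) from by rw [← h0]]
  exact pvMain _ 0 [] [] (by simp) (fun m => by simp [pvC, pvBelow, pvLoopCnt])
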